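-- pv_equiv track=rewrite | github.com/fdsig/vans | van_scraping_utils.py | _generate_full_postcodes
-- ===== SOURCE A (Python) =====
-- from typing import List, Dict, Any, Optional, Set, Tuple
--
-- def _generate_full_postcodes(area_codes: List[str], limit: int) -> List[str]:
--     """Generate full postcodes from area codes"""
--     postcodes = []
--     for area_code in area_codes:
--         if len(postcodes) >= limit:
--             break
--
--         # Generate 2-3 full postcodes per area
--         variations = [
--             f"{area_code} 1AA", f"{area_code} 2BB", f"{area_code} 3CC"
--         ]
--         for variation in variations:
--             if len(postcodes) < limit:
--                 postcodes.append(variation)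
--
--     return postcodes
-- ===== SOURCE B (Python) =====
-- def _generate_full_postcodes(area_codes, limit):
--     """Generate full postcodes from area codes"""
--     suffixes = (" 1AA", " 2BB", " 3CC")
--     k = min(3 * len(area_codes), max(limit, 0))
--     return [area_codes[i // 3] + suffixes[i % 3] for i in range(k)]
-- ===== Notes on version B (the rewrite author's own statement) =====
-- stated objective: alternative
-- what changed: Computes the exact output length k = min(3*len(area_codes), max(limit,0)) in closed form, then constructs each postcode directly by index arithmetic (area_codes[i//3] + suffixes[i%3] for i in range(k)) instead of A's nested loops with break and per-item limit checks.
import Mathlib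
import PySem

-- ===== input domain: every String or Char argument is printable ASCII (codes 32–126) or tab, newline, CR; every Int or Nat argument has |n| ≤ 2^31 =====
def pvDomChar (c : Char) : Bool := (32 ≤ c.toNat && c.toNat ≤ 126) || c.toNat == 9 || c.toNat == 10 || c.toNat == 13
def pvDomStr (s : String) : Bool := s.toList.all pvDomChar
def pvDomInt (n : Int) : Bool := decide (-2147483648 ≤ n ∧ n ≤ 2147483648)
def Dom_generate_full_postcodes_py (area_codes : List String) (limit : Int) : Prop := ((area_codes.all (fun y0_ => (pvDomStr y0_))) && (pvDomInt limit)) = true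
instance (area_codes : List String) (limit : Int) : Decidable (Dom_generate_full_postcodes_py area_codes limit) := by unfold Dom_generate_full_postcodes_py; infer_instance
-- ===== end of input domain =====

-- B computes the output length k = min(3*len, max(limit,0)) in closed form and builds each
-- postcode directly by index arithmetic (i//3 selects the area, i%3 the suffix), instead of
-- A's nested loops with break and per-item limit checks (same values; objective: alternative).
-- ===== PORT A =====
-- inner 'for variation in variations: if len(postcodes) < limit: postcodes.append(variation)'
def pvInnerLoop (limit : Int) (postcodes : List String) (variations : List String) : List String :=
  variations.foldl (fun ps v => if (ps.length : Int) < limit then ps ++ [v] else ps) postcodes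

-- outer 'for area_code in area_codes' with the break
def pvOuterLoop (limit : Int) (postcodes : List String) : List String → List String
  | [] => postcodes
  | area_code :: rest =>
    if (postcodes.length : Int) ≥ limit then postcodes
    else
      pvOuterLoop limit
        (pvInnerLoop limit postcodes
          [area_code ++ " 1AA", area_code ++ " 2BB", area_code ++ " 3CC"]) rest

def generate_full_postcodes_py (area_codes : List String) (limit : Int) : List String :=
  pvOuterLoop limit [] area_codes

-- ===== PORT B =====
def pvSuffixes : List String := [" 1AA", " 2BB", " 3CC"]

-- i // 3 and i % 3 over range k; i ≥ 0 so Nat division/mod coincide with Python's.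
def generate_full_postcodes_py_alt (area_codes : List String) (limit : Int) : List String :=
  let k : Nat := min (3 * area_codes.length) (max limit 0).toNat
  (List.range k).map (fun i => area_codes.getD (i / 3) "" ++ pvSuffixes.getD (i % 3) "")

-- ===== PRECONDITION & SPEC =====
def Spec_generate_full_postcodes_py (area_codes : List String) (limit : Int) (out : List String) : Prop := out = generate_full_postcodes_py_alt area_codes limit
instance (area_codes : List String) (limit : Int) (out : List String) : Decidable (Spec_generate_full_postcodes_py area_codes limit out) := by unfold Spec_generate_full_postcodes_py; infer_instance

-- ===== CLAIM (what is proved, stated in full; the proofs are below) =====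
def Claim_equal_generate_full_postcodes_py : Prop := ∀ (area_codes : List String) (limit : Int), Dom_generate_full_postcodes_py area_codes limit → Spec_generate_full_postcodes_py area_codes limit (generate_full_postcodes_py area_codes limit)

-- ===== LEMMAS AND PROOFS =====

lemma pv_toNat_max (l : Int) : (max l 0).toNat = l.toNat := by
  rcases le_total l 0 with h | h
  · simp [max_eq_right h]; omega
  · simp [max_eq_left h]

lemma pvInnerLoop_eq (limit : Int) (acc vars : List String) :
    pvInnerLoop limit acc vars = acc ++ vars.take (limit.toNat - acc.length) := by
  induction vars generalizing acc with
  | nil => simp [pvInnerLoop]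
  | cons v vs ih =>
    simp only [pvInnerLoop, List.foldl] at ih ⊢
    by_cases h : (acc.length : Int) < limit
    · rw [if_pos h, ih]
      have hk : limit.toNat - acc.length = (limit.toNat - (acc ++ [v]).length) + 1 := by
        simp; omega
      rw [hk]
      simp [List.take_succ_cons]
    · rw [if_neg h, ih]
      have hk : limit.toNat - acc.length = 0 := by omega
      simp [hk]

-- A's loops produce the first (limit.toNat) elements of the full cross product.
lemma pvOuterLoop_eq (limit : Int) (cs acc : List String) :
    pvOuterLoop limit acc cs =
      acc ++ (cs.flatMap (fun a => pvSuffixes.map (fun s => a ++ s))).take (limit.toNat - acc.length) := by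
  induction cs generalizing acc with
  | nil => simp [pvOuterLoop]
  | cons a rest ih =>
    simp only [pvOuterLoop]
    by_cases h : (acc.length : Int) ≥ limit
    · rw [if_pos h]
      have hk : limit.toNat - acc.length = 0 := by omega
      simp [hk]
    · rw [if_neg h, ih, pvInnerLoop_eq]
      simp only [List.flatMap_cons, pvSuffixes, List.map]
      rw [List.take_append, List.append_assoc]
      have hlen : (acc ++ List.take (limit.toNat - acc.length)
          [a ++ " 1AA", a ++ " 2BB", a ++ " 3CC"]).length
          = acc.length + min (limit.toNat - acc.length) 3 := by
        simp
      rw [hlen]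
      congr 2
      congr 1
      simp only [List.length_cons, List.length_nil]
      omega

-- The cross product equals the indexed form over the full range.
lemma pvFlatMap_eq_range (cs : List String) :
    cs.flatMap (fun a => pvSuffixes.map (fun s => a ++ s)) =
      (List.range (3 * cs.length)).map
        (fun i => cs.getD (i / 3) "" ++ pvSuffixes.getD (i % 3) "") := by
  induction cs with
  | nil => simp
  | cons a rest ih =>
    have h3 : 3 * (a :: rest).length = 3 + 3 * rest.length := by simp; ring
    rw [List.flatMap_cons, ih, h3, List.range_add, List.map_append, List.map_map]
    congr 1
    · apply List.map_congr_left
      intro i _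
      have hdiv : (3 + i) / 3 = i / 3 + 1 := by omega
      have hmod : (3 + i) % 3 = i % 3 := by omega
      simp [hdiv, hmod]

-- ===== VERDICT =====
theorem generate_full_postcodes_py_spec : Claim_equal_generate_full_postcodes_py := by
  intro area_codes limit _
  unfold Spec_generate_full_postcodes_py generate_full_postcodes_py generate_full_postcodes_py_alt
  rw [pvOuterLoop_eq, pvFlatMap_eq_range, pv_toNat_max]
  simp [← List.map_take, List.take_range, min_comm]
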